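-- pv_equiv track=rewrite | github.com/3jieun3/Algorithm | 프로그래머스/lv1/17681. ［1차］ 비밀지도/［1차］ 비밀지도.py | solution
-- ===== SOURCE A (Python) =====
-- def solution(n, arr1, arr2):
--     answer = ['' for _ in range(n)]
--     for i in range(n):
--         bin1 = list(map(int, bin(arr1[i]).lstrip('0b').zfill(n)))
--         bin2 = list(map(int, bin(arr2[i]).lstrip('0b').zfill(n)))
--         for j in range(n):
--             if (bin1[j] | bin2[j]):
--                 answer[i] += '#'
--             else:
--                 answer[i] += ' '
--     return answer
-- ===== SOURCE B (Python) =====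
-- def solution(n, arr1, arr2):
--     # OR at the integer level, format once, translate digits in bulk
--     return [format(arr1[i] | arr2[i], 'b').zfill(n).replace('1', '#').replace('0', ' ')
--             for i in range(n)]
-- ===== Notes on version B (the rewrite author's own statement) =====
-- stated objective: simpler
-- what changed: B ORs each row at the integer level and formats the single value once (format(v,'b').zfill(n) plus two bulk replaces) in a list comprehension, removing A's two per-row digit lists and the inner per-bit comparison loop.
-- outside the precondition, e.g. on solution(1, [2], [0]): A returns ['#'], B returns ['# ']
import Mathlib
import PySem

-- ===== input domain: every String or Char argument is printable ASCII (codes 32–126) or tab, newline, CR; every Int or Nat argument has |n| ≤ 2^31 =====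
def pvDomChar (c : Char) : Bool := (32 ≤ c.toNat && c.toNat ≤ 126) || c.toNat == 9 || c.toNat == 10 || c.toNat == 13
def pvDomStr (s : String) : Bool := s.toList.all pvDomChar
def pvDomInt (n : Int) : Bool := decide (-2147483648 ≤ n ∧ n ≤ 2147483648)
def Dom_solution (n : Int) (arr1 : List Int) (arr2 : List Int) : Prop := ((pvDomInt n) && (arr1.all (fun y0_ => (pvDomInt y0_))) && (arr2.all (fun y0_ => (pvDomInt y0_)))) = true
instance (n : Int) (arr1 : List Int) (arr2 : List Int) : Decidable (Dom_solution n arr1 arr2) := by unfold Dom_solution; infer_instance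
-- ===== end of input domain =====

-- B ORs each row at the integer level and formats the single value once (two bulk digit
-- replacements) instead of comparing two per-row digit lists bit by bit (objective: simpler).

-- ===== PORT A =====
-- helper = A's `list(map(int, bin(x).lstrip('0b').zfill(n)))`.
-- `s.lstrip('0b')` is ported by hand as dropWhile of the chars {'0','b'} (exact: lstrip
-- removes exactly the leading chars of that set); `int(c)` is PySem.Int.ofChars? with
-- default 0 (Python raises ValueError on a non-digit char; Pre_ excludes those inputs).
def rowBitsA (x : Int) (n : Int) : List Int :=
  (PySem.Chars.zfill
    (((PySem.Int.pyBin x).toList).dropWhile (fun c => c == '0' || c == 'b')) n).map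
    (fun c => (PySem.Int.ofChars? [c]).getD 0)

-- list indexing arr[i] is pyGetD with default 0 (IndexError excluded by Pre_)
def solution (n : Int) (arr1 : List Int) (arr2 : List Int) : List String :=
  (PySem.List.pyRange 0 n 1).map (fun i =>
    let bin1 := rowBitsA (PySem.List.pyGetD arr1 i 0) n
    let bin2 := rowBitsA (PySem.List.pyGetD arr2 i 0) n
    (PySem.List.pyRange 0 n 1).foldl (fun acc j =>
      if PySem.Int.bor (PySem.List.pyGetD bin1 j 0) (PySem.List.pyGetD bin2 j 0) ≠ 0
      then acc ++ "#" else acc ++ " ") "")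

-- ===== PORT B =====
def solution_alt (n : Int) (arr1 : List Int) (arr2 : List Int) : List String :=
  (PySem.List.pyRange 0 n 1).map (fun i =>
    PySem.Str.replace (PySem.Str.replace
      (PySem.Str.zfill
        (PySem.Int.toBin (PySem.Int.bor (PySem.List.pyGetD arr1 i 0) (PySem.List.pyGetD arr2 i 0))) n)
      "1" "#") "0" " ")

-- ===== PRECONDITION & SPEC =====
-- Pre_ excludes: rows missing from arr1/arr2 (IndexError) and negative row values
-- (ValueError from int('-')); it also excludes rows with a value ≥ 2^n, an unspecified
-- corner on which A returns the top n bits of the too-long bit string while B returns the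
-- whole (wider than n) row — both return, the map format specifies neither.
def Pre_solution (n : Int) (arr1 : List Int) (arr2 : List Int) : Prop :=
  (n ≤ (arr1.length : Int) ∧ n ≤ (arr2.length : Int)) ∧
  (∀ x ∈ arr1.take n.toNat, 0 ≤ x ∧ x < 2 ^ n.toNat) ∧
  (∀ x ∈ arr2.take n.toNat, 0 ≤ x ∧ x < 2 ^ n.toNat)
instance (n : Int) (arr1 : List Int) (arr2 : List Int) : Decidable (Pre_solution n arr1 arr2) := by unfold Pre_solution; infer_instance

def pvWitness_solution : Int × List Int × List Int := (2, [1, 2], [2, 1])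

def Spec_solution (n : Int) (arr1 : List Int) (arr2 : List Int) (out : List String) : Prop := out = solution_alt n arr1 arr2
instance (n : Int) (arr1 : List Int) (arr2 : List Int) (out : List String) : Decidable (Spec_solution n arr1 arr2 out) := by unfold Spec_solution; infer_instance

-- ===== CLAIM (what is proved, stated in full; the proofs are below) =====
def Claim_equal_solution : Prop := ∀ (n : Int) (arr1 : List Int) (arr2 : List Int), Dom_solution n arr1 arr2 → Pre_solution n arr1 arr2 → Spec_solution n arr1 arr2 (solution n arr1 arr2)

-- ===== LEMMAS AND PROOFS =====

def bitsRec : Nat → List Char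
  | 0 => []
  | (v + 1) => bitsRec ((v + 1) / 2) ++ [if (v + 1) % 2 = 1 then '1' else '0']
decreasing_by exact Nat.div_lt_self (Nat.succ_pos v) (by norm_num)
def padbin : Nat → Nat → List Char
  | 0, _ => []
  | (m + 1), v => padbin m (v / 2) ++ [if v % 2 = 1 then '1' else '0']
theorem bitsRec_pos (v : Nat) (hv : 0 < v) :
    bitsRec v = bitsRec (v / 2) ++ [if v % 2 = 1 then '1' else '0'] := by
  cases v with
  | zero => omega
  | succ v => rw [bitsRec]

theorem bitsRec_head (v : Nat) (hv : 0 < v) : ∃ t, bitsRec v = '1' :: t := by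
  induction v using Nat.strong_induction_on with
  | _ v ih =>
    rw [bitsRec_pos v hv]
    rcases Nat.lt_or_ge v 2 with h | h
    · interval_cases v
      · simp [bitsRec]
    · obtain ⟨t, ht⟩ := ih (v / 2) (by omega) (by omega)
      exact ⟨t ++ [if v % 2 = 1 then '1' else '0'], by rw [ht]; simp⟩

theorem toDigitsCore_eq (f : Nat) : ∀ (n : Nat) (l : List Char), n < 2 ^ (f + 1) →
    Nat.toDigitsCore 2 (f + 1) n l = (if n = 0 then ['0'] else bitsRec n) ++ l := by
  induction f with
  | zero =>
    intro n l h
    have h' : n < 2 := by norm_num at h; omega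
    clear h
    interval_cases n
    · show Nat.toDigitsCore 2 1 0 l = ['0'] ++ l
      rfl
    · show Nat.toDigitsCore 2 1 1 l = bitsRec 1 ++ l
      rw [bitsRec_pos 1 (by norm_num), show bitsRec 0 = [] from by rw [bitsRec]]
      rfl
  | succ f ih =>
    intro n l h
    rw [Nat.toDigitsCore]
    by_cases h0 : n / 2 = 0
    · simp only [h0, if_true]
      rcases Nat.lt_or_ge n 2 with h2 | h2
      · interval_cases n <;> simp [bitsRec, Nat.digitChar]
      · omega
    · simp only [h0, if_false]
      rw [ih (n / 2) _ (by rw [pow_succ] at h; omega)]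
      rw [if_neg h0, bitsRec_pos n (by omega)]
      have : Nat.digitChar (n % 2) = if n % 2 = 1 then '1' else '0' := by
        rcases Nat.mod_two_eq_zero_or_one n with h1 | h1 <;> simp [h1, Nat.digitChar]
      rw [this, if_neg (by omega : ¬ n = 0)]
      simp

theorem toDigits_two_eq (n : Nat) :
    Nat.toDigits 2 n = (if n = 0 then ['0'] else bitsRec n) := by
  rw [Nat.toDigits, toDigitsCore_eq n n [] (by
    calc n < 2 ^ n := Nat.lt_two_pow_self
    _ ≤ 2 ^ (n+1) := Nat.pow_le_pow_right (by norm_num) (by omega))]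
  simp

theorem length_bitsRec_le (m : Nat) : ∀ v : Nat, v < 2 ^ m → (bitsRec v).length ≤ m := by
  induction m with
  | zero => intro v h; interval_cases v; simp [bitsRec]
  | succ m ih =>
    intro v h
    rcases Nat.eq_zero_or_pos v with h0 | h0
    · subst h0; simp [bitsRec]
    · rw [bitsRec_pos v h0]
      have := ih (v / 2) (by rw [pow_succ] at h; omega)
      simp; omega

theorem padbin_eq (m : Nat) : ∀ v : Nat, v < 2 ^ m →
    padbin m v = List.replicate (m - (bitsRec v).length) '0' ++ bitsRec v := by
  induction m with
  | zero => intro v h; interval_cases v; simp [padbin, bitsRec]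
  | succ m ih =>
    intro v h
    rcases Nat.eq_zero_or_pos v with h0 | h0
    · subst h0
      rw [padbin, ih 0 (Nat.two_pow_pos m)]
      simp [bitsRec, ← List.replicate_succ']
    · rw [padbin, ih (v / 2) (by rw [pow_succ] at h; omega), bitsRec_pos v h0]
      have hl := length_bitsRec_le m (v/2) (by rw [pow_succ] at h; omega)
      simp only [List.length_append, List.length_singleton, List.append_assoc]
      congr 2
      omega

theorem length_padbin (m : Nat) : ∀ v : Nat, (padbin m v).length = m := by
  induction m with
  | zero => intro v; simp [padbin]
  | succ m ih => intro v; simp [padbin, ih]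

theorem mem_padbin (m : Nat) : ∀ v : Nat, ∀ c ∈ padbin m v, c = '0' ∨ c = '1' := by
  induction m with
  | zero => intro v c hc; simp [padbin] at hc
  | succ m ih =>
    intro v c hc
    simp only [padbin, List.mem_append, List.mem_singleton] at hc
    rcases hc with hc | hc
    · exact ih _ c hc
    · subst hc; split <;> simp

theorem bitsRec_zero : bitsRec 0 = [] := by rw [bitsRec]

theorem strip_pyBin (x : Int) (hx : 0 ≤ x) :
    ((PySem.Int.pyBin x).toList).dropWhile (fun c => c == '0' || c == 'b') = bitsRec x.toNat := by
  rw [PySem.Int.toList_pyBin, PySem.Int.toBinChars0b, if_neg (by omega : ¬ x < 0)]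
  rw [toDigits_two_eq]
  by_cases h0 : x.toNat = 0
  · simp [h0, List.dropWhile, bitsRec_zero]
  · rw [if_neg h0]
    obtain ⟨t, ht⟩ := bitsRec_head x.toNat (by omega)
    rw [ht]
    simp [List.dropWhile]

theorem padbin_zero (m : Nat) : padbin m 0 = List.replicate m '0' := by
  rw [padbin_eq m 0 (Nat.two_pow_pos m), bitsRec_zero]
  simp

theorem zfill_bitsRec (m : Nat) (v : Nat) (hv : v < 2 ^ m) :
    PySem.Chars.zfill (bitsRec v) (m : Int) = padbin m v := by
  have hlen := length_bitsRec_le m v hv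
  rw [PySem.Chars.zfill.eq_def, padbin_eq m v hv]
  by_cases hle : (m : Int) ≤ (bitsRec v).length
  · rw [if_pos hle]
    have : m = (bitsRec v).length := by omega
    simp [this]
  · rw [if_neg hle]
    by_cases h0 : v = 0
    · subst h0
      rw [bitsRec_zero]
      simp
    · obtain ⟨t, ht⟩ := bitsRec_head v (by omega)
      rw [ht]
      have : ¬ ('1' = '+' ∨ '1' = '-') := by decide
      simp only [this, Int.toNat_natCast]
      rw [← ht]
      simp

theorem zfill_toDigits (m : Nat) (v : Nat) (hm : 0 < m) (hv : v < 2 ^ m) :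
    PySem.Chars.zfill (if v = 0 then ['0'] else bitsRec v) (m : Int) = padbin m v := by
  by_cases h0 : v = 0
  · subst h0
    rw [if_pos rfl, PySem.Chars.zfill.eq_def, padbin_zero]
    by_cases h1 : (m : Int) ≤ (['0'] : List Char).length
    · rw [if_pos h1]
      have : m = 1 := by simp at h1; omega
      simp [this]
    · rw [if_neg h1]
      have : ¬ ('0' = '+' ∨ '0' = '-') := by decide
      simp only [this, Int.toNat_natCast]
      simp only [List.length_singleton, if_false]
      rw [← List.replicate_succ']
      congr 1
      omega
  · rw [if_neg h0]
    exact zfill_bitsRec m v hv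

theorem replace_go_single (a b : Char) (fuel : Nat) : ∀ (l acc : List Char), l.length ≤ fuel →
    PySem.Chars.replace.go [a] [b] fuel l acc
      = acc.reverse ++ l.map (fun c => if c = a then b else c) := by
  induction fuel with
  | zero =>
    intro l acc h
    have : l = [] := by cases l <;> simp_all
    subst this
    simp [PySem.Chars.replace.go]
  | succ fuel ih =>
    intro l acc h
    cases l with
    | nil => simp [PySem.Chars.replace.go]
    | cons c t =>
      rw [PySem.Chars.replace.go]
      by_cases hc : c = a
      · subst hc
        rw [if_pos (by simp [List.isPrefixOf])]
        rw [ih _ _ (by simpa using h)]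
        simp
      · rw [if_neg (by simp [List.isPrefixOf]; exact fun hh => hc hh.symm)]
        rw [ih _ _ (by simpa using h)]
        simp [hc]

theorem replace_single (a b : Char) (l : List Char) :
    PySem.Chars.replace l [a] [b] = l.map (fun c => if c = a then b else c) := by
  rw [PySem.Chars.replace]
  simp only [List.isEmpty_cons]
  rw [replace_go_single a b l.length l [] le_rfl]
  simp

theorem lor_div_two (a b : Nat) : (a ||| b) / 2 = a / 2 ||| b / 2 := by
  apply Nat.eq_of_testBit_eq
  intro i
  simp [← Nat.testBit_succ]

theorem lor_mod_two (a b : Nat) : (a ||| b) % 2 = 1 ↔ (a % 2 = 1 ∨ b % 2 = 1) := by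
  have h := Nat.testBit_lor a b 0
  simp only [Nat.testBit_zero] at h
  rcases Nat.mod_two_eq_zero_or_one (a ||| b) with h0 | h0 <;>
    rcases Nat.mod_two_eq_zero_or_one a with h1 | h1 <;>
      rcases Nat.mod_two_eq_zero_or_one b with h2 | h2 <;>
        simp [h0, h1, h2] at h ⊢

theorem zip_padbin (m : Nat) : ∀ va vb : Nat,
    List.zipWith (fun c1 c2 =>
        if PySem.Int.bor ((PySem.Int.ofChars? [c1]).getD 0) ((PySem.Int.ofChars? [c2]).getD 0) ≠ 0
        then '#' else ' ') (padbin m va) (padbin m vb)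
      = (padbin m (va ||| vb)).map (fun c => if c = '1' then '#' else ' ') := by
  induction m with
  | zero => intro va vb; simp [padbin]
  | succ m ih =>
    intro va vb
    rw [padbin, padbin, padbin, lor_div_two]
    rw [List.zipWith_append (by rw [length_padbin, length_padbin])]
    rw [ih (va / 2) (vb / 2)]
    rw [List.map_append]
    congr 1
    have h3 := lor_mod_two va vb
    rcases Nat.mod_two_eq_zero_or_one va with h1 | h1 <;>
      rcases Nat.mod_two_eq_zero_or_one vb with h2 | h2 <;>
        rcases Nat.mod_two_eq_zero_or_one (va ||| vb) with h0 | h0 <;>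
          simp [h0, h1, h2] at h3 ⊢ <;> decide

theorem foldl_append_chars (P : Int → Prop) [DecidablePred P] :
    ∀ (l : List Int) (s : String),
    (l.foldl (fun acc j => if P j then acc ++ "#" else acc ++ " ") s).toList
      = s.toList ++ l.map (fun j => if P j then '#' else ' ') := by
  intro l
  induction l with
  | nil => intro s; simp
  | cons x t ih =>
    intro s
    by_cases hx : P x <;> simp [hx, ih, List.append_assoc]

theorem range_getD_zipWith {α β : Type} (comb : α → α → β) (d : α) (m : Nat) :
    ∀ (l1 l2 : List α), l1.length = m → l2.length = m →
    (List.range m).map (fun k => comb (l1.getD k d) (l2.getD k d)) = List.zipWith comb l1 l2 := by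
  induction m with
  | zero =>
    intro l1 l2 h1 h2
    rw [List.length_eq_zero_iff] at h1 h2
    subst h1; subst h2; simp
  | succ m ih =>
    intro l1 l2 h1 h2
    cases l1 with
    | nil => simp at h1
    | cons x1 t1 =>
      cases l2 with
      | nil => simp at h2
      | cons x2 t2 =>
        rw [List.range_succ_eq_map]
        simp only [List.map_cons, List.map_map, List.zipWith_cons_cons, List.getD_cons_zero]
        congr 1
        rw [← ih t1 t2 (by simpa using h1) (by simpa using h2)]
        simp [Function.comp]

theorem row_eq (n a b : Int) (hn : 0 < n) (ha0 : 0 ≤ a) (hb0 : 0 ≤ b)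
    (ha : a < 2 ^ n.toNat) (hb : b < 2 ^ n.toNat) :
    (PySem.List.pyRange 0 n 1).foldl (fun acc j =>
        if PySem.Int.bor (PySem.List.pyGetD (rowBitsA a n) j 0)
                         (PySem.List.pyGetD (rowBitsA b n) j 0) ≠ 0
        then acc ++ "#" else acc ++ " ") ""
      = PySem.Str.replace (PySem.Str.replace
          (PySem.Str.zfill (PySem.Int.toBin (PySem.Int.bor a b)) n) "1" "#") "0" " " := by
  set m : Nat := n.toNat with hm
  have hmn : (m : Int) = n := Int.toNat_of_nonneg (le_of_lt hn)
  have hva : a.toNat < 2 ^ m := by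
    have h1 : (a.toNat : Int) < ((2 ^ m : Nat) : Int) := by push_cast; rwa [Int.toNat_of_nonneg ha0]
    exact_mod_cast h1
  have hvb : b.toNat < 2 ^ m := by
    have h1 : (b.toNat : Int) < ((2 ^ m : Nat) : Int) := by push_cast; rwa [Int.toNat_of_nonneg hb0]
    exact_mod_cast h1
  -- A's digit lists
  have hrowA : ∀ x : Int, 0 ≤ x → x.toNat < 2 ^ m →
      rowBitsA x n = (padbin m x.toNat).map (fun c => (PySem.Int.ofChars? [c]).getD 0) := by
    intro x hx0 hx
    rw [rowBitsA, strip_pyBin x hx0, ← hmn, zfill_bitsRec m x.toNat hx]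
  apply String.toList_inj.mp
  rw [foldl_append_chars]
  -- B side
  rw [PySem.Str.toList_replace, PySem.Str.toList_replace, PySem.Str.toList_zfill,
      PySem.Int.toList_toBin, PySem.Int.bor_of_nonneg ha0 hb0]
  have hvo : (((a.toNat ||| b.toNat : Nat) : Int)).toNat = a.toNat ||| b.toNat := Int.toNat_natCast _
  rw [show PySem.Int.toBinChars ((a.toNat ||| b.toNat : Nat) : Int)
        = (if a.toNat ||| b.toNat = 0 then ['0'] else bitsRec (a.toNat ||| b.toNat)) from by
      rw [PySem.Int.toBinChars, if_neg (by omega), hvo, toDigits_two_eq]]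
  have hvo2 : a.toNat ||| b.toNat < 2 ^ m := Nat.or_lt_two_pow hva hvb
  rw [← hmn, zfill_toDigits m _ (by omega) hvo2]
  rw [show ("1":String).toList = ['1'] from rfl, show ("#":String).toList = ['#'] from rfl,
      show ("0":String).toList = ['0'] from rfl, show (" ":String).toList = [' '] from rfl]
  rw [replace_single, replace_single, List.map_map]
  rw [show ("":String).toList = [] from rfl, List.nil_append, PySem.List.pyRange_zero_nat m, List.map_map]
  rw [← hmn] at hrowA
  rw [hrowA a ha0 hva, hrowA b hb0 hvb]
  have hget : ∀ (l : List Char) (k : Nat), k < l.length →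
      PySem.List.pyGetD (l.map (fun c => (PySem.Int.ofChars? [c]).getD 0)) (k : Int) 0
        = (PySem.Int.ofChars? [l.getD k '0']).getD 0 := by
    intro l k hk
    rw [PySem.List.pyGetD, PySem.List.pyGet?_natCast,
        List.getElem?_eq_getElem (by simpa using hk), List.getElem_map, Option.getD_some,
        List.getD_eq_getElem l '0' hk]
  rw [List.map_congr_left (l := List.range m)
      (g := fun k => (fun c1 c2 =>
        if PySem.Int.bor ((PySem.Int.ofChars? [c1]).getD 0) ((PySem.Int.ofChars? [c2]).getD 0) ≠ 0
        then '#' else ' ') ((padbin m a.toNat).getD k '0') ((padbin m b.toNat).getD k '0'))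
      (fun k hk => by
        simp only [Function.comp]
        rw [hget (padbin m a.toNat) k (by rw [length_padbin]; simpa using hk),
            hget (padbin m b.toNat) k (by rw [length_padbin]; simpa using hk)])]
  rw [range_getD_zipWith (fun c1 c2 =>
        if PySem.Int.bor ((PySem.Int.ofChars? [c1]).getD 0) ((PySem.Int.ofChars? [c2]).getD 0) ≠ 0
        then '#' else ' ') '0' m _ _ (length_padbin m a.toNat) (length_padbin m b.toNat)]
  rw [zip_padbin m a.toNat b.toNat]
  apply List.map_congr_left
  intro c hc
  rcases mem_padbin m _ c hc with h | h <;> subst h <;> rfl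

theorem solution_eq_alt (n : Int) (arr1 : List Int) (arr2 : List Int) (hpre : Pre_solution n arr1 arr2) :
    solution n arr1 arr2 = solution_alt n arr1 arr2 := by
  obtain ⟨⟨hl1, hl2⟩, hb1, hb2⟩ := hpre
  rw [solution, solution_alt]
  apply List.map_congr_left
  intro i hi
  rw [PySem.List.mem_pyRange_one] at hi
  obtain ⟨hi0, hin⟩ := hi
  have hn : 0 < n := lt_of_le_of_lt hi0 hin
  have hix1 : i.toNat < arr1.length := by omega
  have hix2 : i.toNat < arr2.length := by omega
  have hget : ∀ (l : List Int) (hl : i.toNat < l.length),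
      PySem.List.pyGetD l i 0 = l[i.toNat]'hl := by
    intro l hl
    rw [PySem.List.pyGetD, PySem.List.pyGet?_of_nonneg l hi0, List.getElem?_eq_getElem hl,
        Option.getD_some]
  have hmem1 : arr1[i.toNat] ∈ arr1.take n.toNat := by
    have hlt : i.toNat < (arr1.take n.toNat).length := by rw [List.length_take]; omega
    have : (arr1.take n.toNat)[i.toNat] = arr1[i.toNat] := List.getElem_take
    exact this ▸ List.getElem_mem hlt
  have hmem2 : arr2[i.toNat] ∈ arr2.take n.toNat := by
    have hlt : i.toNat < (arr2.take n.toNat).length := by rw [List.length_take]; omega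
    have : (arr2.take n.toNat)[i.toNat] = arr2[i.toNat] := List.getElem_take
    exact this ▸ List.getElem_mem hlt
  obtain ⟨ha0, ha⟩ := hb1 _ hmem1
  obtain ⟨hb0, hb⟩ := hb2 _ hmem2
  show (PySem.List.pyRange 0 n 1).foldl _ "" = _
  rw [hget arr1 hix1, hget arr2 hix2]
  exact row_eq n arr1[i.toNat] arr2[i.toNat] hn ha0 hb0 ha hb

-- ===== VERDICT (by name: the statement is the Claim_ definition above) =====
theorem solution_spec : Claim_equal_solution := by
  intro n arr1 arr2 _ hpre
  exact solution_eq_alt n arr1 arr2 hpre
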